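-- pv_equiv track=rewrite | github.com/sispk6/MemDidCode | src/preprocessing/semantic_cleaner.py | extract_key_sections
-- ===== SOURCE A (Python) =====
-- def extract_key_sections(text: str) -> str:
--     """Extract Head, Tail and 'Dense' middle blocks for oversized files."""
--     lines = text.split('\n')
--     if len(lines) < 100:
--         return text
--
--     # Keep first 50 lines (Intro/Headers)
--     head = lines[:50]
--
--     # Keep last 50 lines (Conclusion/Summary)
--     tail = lines[-50:]
--
--     # Find a dense block in the middle (heuristic: line length density)
--     # Average length of 20-line window
--     max_density = 0
--     dense_idx = 50
--
--     for i in range(50, len(lines) - 70, 10):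
--         window = lines[i:i+20]
--         density = sum(len(l) for l in window)
--         if density > max_density:
--             max_density = density
--             dense_idx = i
--
--     middle = lines[dense_idx:dense_idx+50]
--
--     result = [
--         "--- START OF DOCUMENT ---",
--         *head,
--         "\n... [LARGE CONTENT REMOVED FOR EFFICIENCY] ...\n",
--         "--- KEY SECTION ---",
--         *middle,
--         "\n... [LARGE CONTENT REMOVED FOR EFFICIENCY] ...\n",
--         "--- END OF DOCUMENT ---",
--         *tail
--     ]
--
--     return '\n'.join(result)
-- ===== SOURCE B (Python) =====
-- def extract_key_sections(text: str) -> str: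
--     """Extract Head, Tail and 'Dense' middle blocks for oversized files."""
--     lines = text.split('\n')
--     n = len(lines)
--     if n < 100:
--         return text
--
--     # Prefix sums: P[j] = total length of lines[:j]; each window sum is O(1).
--     P = [0]
--     t = 0
--     for l in lines:
--         t += len(l)
--         P.append(t)
--
--     # First window start with maximal density (Python max is first-wins on ties;
--     # every density is >= 0 and the first start is 50, matching A's defaults).
--     dense_idx = max(range(50, n - 70, 10),
--                     key=lambda i: P[i + 20] - P[i], default=50)
--
--     fill = "\n... [LARGE CONTENT REMOVED FOR EFFICIENCY] ...\n"
--     return '\n'.join(["--- START OF DOCUMENT ---", *lines[:50],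
--                       fill, "--- KEY SECTION ---", *lines[dense_idx:dense_idx + 50],
--                       fill, "--- END OF DOCUMENT ---", *lines[n - 50:]])
-- ===== Notes on version B (the rewrite author's own statement) =====
-- stated objective: faster
-- what changed: Replaces the per-window re-summation loop with first-wins running-max state by a prefix-sum array built once plus a single max(range(...), key=...) call whose key is an O(1) subtraction.
import Mathlib
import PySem

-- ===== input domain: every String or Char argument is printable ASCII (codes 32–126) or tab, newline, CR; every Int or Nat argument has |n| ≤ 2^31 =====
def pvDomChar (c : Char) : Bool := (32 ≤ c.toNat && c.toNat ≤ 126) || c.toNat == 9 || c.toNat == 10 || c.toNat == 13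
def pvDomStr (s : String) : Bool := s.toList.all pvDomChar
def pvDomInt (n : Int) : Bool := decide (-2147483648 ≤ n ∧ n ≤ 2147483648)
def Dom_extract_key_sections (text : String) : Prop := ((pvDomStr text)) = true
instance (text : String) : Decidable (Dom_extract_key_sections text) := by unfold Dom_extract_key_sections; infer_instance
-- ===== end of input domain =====

-- B builds a prefix-sum array once and picks the densest window start with a single
-- first-wins max over the starts, instead of A's per-window re-summation loop.

-- ===== PORT A =====
-- text.split('\n'): split? is always `some` here since the separator "\n" is nonempty.
def extract_key_sections (text : String) : String :=
  let lines := ((PySem.Str.split? text "\n").getD [])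
  if lines.length < 100 then text
  else
    let head := PySem.List.slice lines none (some 50)
    let tail := PySem.List.slice lines (some (-50)) none
    let st := (PySem.List.pyRange 50 ((lines.length : Int) - 70) 10).foldl
      (fun (s : Int × Int) i =>
        let window := PySem.List.slice lines (some i) (some (i + 20))
        let density := (window.map PySem.Str.len).sum
        if density > s.1 then (density, i) else s) (0, 50)
    let dense_idx := st.2
    let middle := PySem.List.slice lines (some dense_idx) (some (dense_idx + 50))
    let result := ["--- START OF DOCUMENT ---"] ++ head ++
      ["\n... [LARGE CONTENT REMOVED FOR EFFICIENCY] ...\n", "--- KEY SECTION ---"] ++ middle ++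
      ["\n... [LARGE CONTENT REMOVED FOR EFFICIENCY] ...\n", "--- END OF DOCUMENT ---"] ++ tail
    PySem.Str.join "\n" result

-- ===== PORT B =====
def extract_key_sections_alt (text : String) : String :=
  let lines := ((PySem.Str.split? text "\n").getD [])
  let n : Int := lines.length
  if n < 100 then text
  else
    let P := (lines.foldl (fun (st : List Int × Int) l =>
        let t := st.2 + PySem.Str.len l
        (st.1 ++ [t], t)) ([(0 : Int)], (0 : Int))).1
    let dense_idx := (PySem.List.max? (PySem.List.pyRange 50 (n - 70) 10)
        (fun i => PySem.List.pyGetD P (i + 20) 0 - PySem.List.pyGetD P i 0)).getD 50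
    let fill := "\n... [LARGE CONTENT REMOVED FOR EFFICIENCY] ...\n"
    PySem.Str.join "\n" (["--- START OF DOCUMENT ---"] ++ PySem.List.slice lines none (some 50) ++
      [fill, "--- KEY SECTION ---"] ++ PySem.List.slice lines (some dense_idx) (some (dense_idx + 50)) ++
      [fill, "--- END OF DOCUMENT ---"] ++ PySem.List.slice lines (some (n - 50)) none)

-- ===== PRECONDITION & SPEC =====
def Spec_extract_key_sections (text : String) (out : String) : Prop := out = extract_key_sections_alt text
instance (text : String) (out : String) : Decidable (Spec_extract_key_sections text out) := by unfold Spec_extract_key_sections; infer_instance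

-- ===== CLAIM (what is proved, stated in full; the proofs are below) =====
def Claim_equal_extract_key_sections : Prop := ∀ (text : String), Dom_extract_key_sections text → Spec_extract_key_sections text (extract_key_sections text)

-- ===== LEMMAS AND PROOFS =====

/-- Total character length of a list of lines. -/
def sumLen (xs : List String) : Int := (xs.map PySem.Str.len).sum

/-- Spec of B's prefix-sum loop body: the list of running totals starting at `t`. -/
def prefixes (t : Int) : List String → List Int
  | [] => []
  | l :: xs => (t + PySem.Str.len l) :: prefixes (t + PySem.Str.len l) xs

lemma foldl_build (xs : List String) : ∀ (acc : List Int) (t : Int),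
    xs.foldl (fun (st : List Int × Int) l =>
        let t := st.2 + PySem.Str.len l
        (st.1 ++ [t], t)) (acc, t) = (acc ++ prefixes t xs, t + sumLen xs) := by
  induction xs with
  | nil => intro acc t; simp [prefixes, sumLen]
  | cons l xs ih =>
      intro acc t
      simp only [List.foldl_cons, ih, prefixes, sumLen, List.map_cons, List.sum_cons,
        Prod.mk.injEq]
      constructor
      · simp
      · ring

lemma getD_prefixes (xs : List String) : ∀ (t : Int) (j : Nat), j < xs.length →
    (prefixes t xs).getD j 0 = t + sumLen (xs.take (j + 1)) := by
  induction xs with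
  | nil => intro t j h; simp at h
  | cons l xs ih =>
      intro t j h
      cases j with
      | zero => simp [prefixes, sumLen]
      | succ k =>
          simp only [prefixes, List.getD_cons_succ]
          rw [ih _ k (by simpa using h)]
          simp [sumLen]
          ring

lemma getD_P (lines : List String) (j : Nat) (h : j ≤ lines.length) :
    ((0 : Int) :: prefixes 0 lines).getD j 0 = sumLen (lines.take j) := by
  cases j with
  | zero => simp [sumLen]
  | succ k =>
      simp only [List.getD_cons_succ]
      rw [getD_prefixes lines 0 k (by omega)]
      simp

lemma sumLen_take_sub (xs : List String) (a k : Nat) :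
    sumLen (xs.take (a + k)) - sumLen (xs.take a) = sumLen ((xs.drop a).take k) := by
  rw [List.take_add]
  simp [sumLen]

lemma density_eq (lines : List String) (i : Int) (h1 : 50 ≤ i)
    (h2 : i < (lines.length : Int) - 70) :
    PySem.List.pyGetD ((0 : Int) :: prefixes 0 lines) (i + 20) 0
      - PySem.List.pyGetD ((0 : Int) :: prefixes 0 lines) i 0
    = ((PySem.List.slice lines (some i) (some (i + 20))).map PySem.Str.len).sum := by
  obtain ⟨a, rfl⟩ : ∃ a : Nat, i = (a : Int) := ⟨i.toNat, by omega⟩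
  have hlen : a + 20 ≤ lines.length := by omega
  rw [show ((a : Int) + 20) = ((a : Int) + ((20 : Nat) : Int)) from by norm_num,
    PySem.List.slice_natCast_add,
    show ((a : Int) + ((20 : Nat) : Int)) = ((a + 20 : Nat) : Int) from by push_cast; ring,
    PySem.List.pyGetD_natCast, PySem.List.pyGetD_natCast,
    getD_P lines (a + 20) hlen, getD_P lines a (by omega),
    sumLen_take_sub lines a 20]
  simp [sumLen]

/-- A's pair fold from a state of the form `(key b, b)` keeps that form, tracking
the first-wins running maximum of `key`. -/
lemma pairfold (key : Int → Int) : ∀ (t : List Int) (b : Int),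
    t.foldl (fun (s : Int × Int) i => if key i > s.1 then (key i, i) else s) (key b, b)
    = (key (t.foldl (fun m y => if key m < key y then y else m) b),
       t.foldl (fun m y => if key m < key y then y else m) b) := by
  intro t
  induction t with
  | nil => intro b; rfl
  | cons x t ih =>
      intro b
      simp only [List.foldl_cons]
      by_cases h : key b < key x
      · rw [if_pos (by exact h), if_pos h, ih]
      · rw [if_neg (by exact h), if_neg h, ih]

/-- `max?` started on a cons is the same first-wins running maximum. -/
lemma max?_cons_fold (key : Int → Int) (b : Int) (t : List Int) :
    PySem.List.max? (b :: t) key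
    = some (t.foldl (fun m y => if key m < key y then y else m) b) := by
  show (t.foldl _ (some b)) = _
  induction t generalizing b with
  | nil => rfl
  | cons x t ih =>
      simp only [List.foldl_cons]
      by_cases h : key b < key x
      · simp only [if_pos h]; exact ih x
      · simp only [if_neg h]; exact ih b

/-- The nonempty step-10 range starts at 50. -/
lemma pyRange_fifty (B : Int) (h : 50 < B) :
    ∃ t, PySem.List.pyRange 50 B 10 = 50 :: t := by
  rw [PySem.List.pyRange_of_pos 50 B (by norm_num : (0:Int) < 10), if_pos h]
  have hn : 0 < ((B - 50 + 10 - 1) / 10).toNat := by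
    have : (1 : Int) ≤ (B - 50 + 10 - 1) / 10 := by
      apply Int.le_ediv_of_mul_le (by norm_num)
      omega
    omega
  obtain ⟨k, hk⟩ : ∃ k, ((B - 50 + 10 - 1) / 10).toNat = k + 1 :=
    ⟨((B - 50 + 10 - 1) / 10).toNat - 1, by omega⟩
  rw [hk, List.range_succ_eq_map]
  refine ⟨(List.range k).map (fun j => 50 + 10 * ((j + 1 : Nat) : Int)), ?_⟩
  simp [Function.comp_def, Nat.succ_eq_add_one]

/-- A's argmax fold equals B's `max? … |>.getD 50`, given the key is ≥ 0 at 50. -/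
lemma argmax_eq (key : Int → Int) (B : Int) (hk : 50 < B → 0 ≤ key 50) :
    ((PySem.List.pyRange 50 B 10).foldl
      (fun (s : Int × Int) i => if key i > s.1 then (key i, i) else s) (0, 50)).2
    = (PySem.List.max? (PySem.List.pyRange 50 B 10) key).getD 50 := by
  by_cases h : 50 < B
  · obtain ⟨t, ht⟩ := pyRange_fifty B h
    rw [ht, max?_cons_fold, List.foldl_cons, Option.getD_some]
    have h0 : 0 ≤ key 50 := hk h
    by_cases hp : key 50 > 0
    · rw [if_pos hp, pairfold]
    · rw [if_neg hp, show ((0 : Int), (50 : Int)) = (key 50, 50) from by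
        have : key 50 = 0 := by omega
        simp [this], pairfold]
  · rw [show PySem.List.pyRange 50 B 10 = [] from by
      rw [PySem.List.pyRange_of_pos 50 B (by norm_num : (0:Int) < 10), if_neg h]; rfl]
    rfl

lemma fold_eq (lines : List String) :
    ((PySem.List.pyRange 50 ((lines.length : Int) - 70) 10).foldl
      (fun (s : Int × Int) i =>
        let window := PySem.List.slice lines (some i) (some (i + 20))
        let density := (window.map PySem.Str.len).sum
        if density > s.1 then (density, i) else s) (0, 50)).2
    = (PySem.List.max? (PySem.List.pyRange 50 ((lines.length : Int) - 70) 10)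
        (fun i => PySem.List.pyGetD ((0 : Int) :: prefixes 0 lines) (i + 20) 0
          - PySem.List.pyGetD ((0 : Int) :: prefixes 0 lines) i 0)).getD 50 := by
  have hc : (PySem.List.pyRange 50 ((lines.length : Int) - 70) 10).foldl
      (fun (s : Int × Int) i =>
        let window := PySem.List.slice lines (some i) (some (i + 20))
        let density := (window.map PySem.Str.len).sum
        if density > s.1 then (density, i) else s) (0, 50)
    = (PySem.List.pyRange 50 ((lines.length : Int) - 70) 10).foldl
      (fun (s : Int × Int) i =>
        let density := PySem.List.pyGetD ((0 : Int) :: prefixes 0 lines) (i + 20) 0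
          - PySem.List.pyGetD ((0 : Int) :: prefixes 0 lines) i 0
        if density > s.1 then (density, i) else s) (0, 50) := by
    apply PySem.List.foldl_congr_mem
    intro acc i hi
    have hm := (PySem.List.mem_pyRange_iff_of_pos (by norm_num : (0:Int) < 10) i).1 hi
    simp only [density_eq lines i hm.1 hm.2.1]
  rw [hc, argmax_eq]
  intro h
  rw [density_eq lines 50 (le_refl _) h]
  apply List.sum_nonneg
  intro x hx
  obtain ⟨s, _, rfl⟩ := List.mem_map.mp hx
  simp [PySem.Str.len]

lemma slice_tail (lines : List String) (h : ¬ (lines.length : Int) < 100) :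
    PySem.List.slice lines (some (-50)) none
    = PySem.List.slice lines (some ((lines.length : Int) - 50)) none := by
  rw [PySem.List.slice_from_neg_ofNat lines 50 (by norm_num),
    PySem.List.slice_some_none]
  congr 1
  simp only [PySem.List.clampIdx]
  split_ifs <;> omega

-- ===== VERDICT (by name: the statement is the Claim_ definition above) =====
theorem extract_key_sections_spec : Claim_equal_extract_key_sections := by
  intro text _
  unfold Spec_extract_key_sections extract_key_sections extract_key_sections_alt
  by_cases h : (((PySem.Str.split? text "\n").getD [])).length < 100
  · have h2 : ((((PySem.Str.split? text "\n").getD []).length : Int) < 100) := by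
      exact_mod_cast h
    simp only [if_pos h, if_pos h2]
  · have h' : ¬ ((((PySem.Str.split? text "\n").getD []).length : Int) < 100) := by
      exact_mod_cast h
    simp only [if_neg h, if_neg h', foldl_build, fold_eq,
      slice_tail _ h', List.singleton_append]
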